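-- pv_equiv track=rewrite | github.com/patrickvk1978/sports-closet-tracker | services/api/poller.py | slot_meta
-- ===== SOURCE A (Python) =====
-- def slot_meta(slot):
--     """Return (round_key, region_key) for a slot index."""
--     for key, base in (('midwest', 0), ('west', 15), ('south', 30), ('east', 45)):
--         if base <= slot < base + 15:
--             off = slot - base
--             rnd = 'R64' if off < 8 else 'R32' if off < 12 else 'S16' if off < 14 else 'E8'
--             return rnd, key
--     if slot in (60, 61): return 'F4',   None
--     if slot == 62:        return 'Champ', None
--     return 'R64', None
-- ===== SOURCE B (Python) =====
-- REGIONS = ('midwest', 'west', 'south', 'east')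
--
-- def slot_meta(slot):
--     """Return (round_key, region_key) for a slot index."""
--     if 0 <= slot < 60:
--         off = slot % 15
--         rnd = 'R64' if off < 8 else 'R32' if off < 12 else 'S16' if off < 14 else 'E8'
--         return rnd, REGIONS[slot // 15]
--     if slot in (60, 61): return 'F4', None
--     if slot == 62: return 'Champ', None
--     return 'R64', None
-- ===== Notes on version B (the rewrite author's own statement) =====
-- stated objective: simpler
-- what changed: The scan over the (region, base) tuples is replaced by a single range test with division/modulo arithmetic (region = REGIONS[slot // 15], round from slot % 15).
import Mathlib
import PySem

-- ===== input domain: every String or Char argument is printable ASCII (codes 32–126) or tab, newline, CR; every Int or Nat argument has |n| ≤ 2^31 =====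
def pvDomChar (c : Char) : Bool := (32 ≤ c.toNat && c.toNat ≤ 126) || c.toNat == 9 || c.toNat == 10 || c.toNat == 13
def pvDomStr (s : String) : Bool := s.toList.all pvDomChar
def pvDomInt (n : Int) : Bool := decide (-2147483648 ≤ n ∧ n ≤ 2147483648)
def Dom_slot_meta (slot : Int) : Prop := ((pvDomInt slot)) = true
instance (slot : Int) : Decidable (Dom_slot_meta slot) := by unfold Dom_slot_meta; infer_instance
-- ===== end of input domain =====

-- B replaces A's scan over (region, base) tuples by divmod arithmetic; objective: simpler.

-- ===== PORT A =====
-- A's for-loop over the literal tuple, as a structural scan over the same pairs.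
def slotScan (pairs : List (String × Int)) (slot : Int) : Option (String × Option String) :=
  match pairs with
  | [] => none
  | (key, base) :: rest =>
    if base ≤ slot ∧ slot < base + 15 then
      let off := slot - base
      let rnd := if off < 8 then "R64" else if off < 12 then "R32" else if off < 14 then "S16" else "E8"
      some (rnd, some key)
    else slotScan rest slot

def slot_meta (slot : Int) : String × Option String :=
  match slotScan [("midwest", 0), ("west", 15), ("south", 30), ("east", 45)] slot with
  | some r => r
  | none =>
    if slot = 60 ∨ slot = 61 then ("F4", none)
    else if slot = 62 then ("Champ", none)
    else ("R64", none)

-- ===== PORT B =====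
-- REGIONS[slot // 15]: the index is provably 0..3 under the guard, so getD's default is unreachable.
def slot_meta_alt (slot : Int) : String × Option String :=
  if 0 ≤ slot ∧ slot < 60 then
    let off := PySem.Int.mod slot 15
    let rnd := if off < 8 then "R64" else if off < 12 then "R32" else if off < 14 then "S16" else "E8"
    (rnd, (PySem.List.pyGet? ["midwest", "west", "south", "east"] (PySem.Int.floordiv slot 15)))
  else if slot = 60 ∨ slot = 61 then ("F4", none)
  else if slot = 62 then ("Champ", none)
  else ("R64", none)

-- ===== PRECONDITION & SPEC =====
def Spec_slot_meta (slot : Int) (out : String × Option String) : Prop := out = slot_meta_alt slot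
instance (slot : Int) (out : String × Option String) : Decidable (Spec_slot_meta slot out) := by unfold Spec_slot_meta; infer_instance

-- ===== CLAIM (what is proved, stated in full; the proofs are below) =====
def Claim_equal_slot_meta : Prop := ∀ (slot : Int), Dom_slot_meta slot → Spec_slot_meta slot (slot_meta slot)

-- ===== LEMMAS AND PROOFS =====
theorem slot_meta_eq_alt (slot : Int) : slot_meta slot = slot_meta_alt slot := by
  by_cases h : 0 ≤ slot ∧ slot < 63
  · obtain ⟨h0, h1⟩ := h
    interval_cases slot <;> decide
  · have h0 : ¬ (0 ≤ slot ∧ slot < 60) := by omega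
    have h60 : ¬ (slot = 60 ∨ slot = 61) := by omega
    have h62 : slot ≠ 62 := by omega
    simp only [slot_meta, slot_meta_alt, slotScan]
    rw [if_neg (by omega), if_neg (by omega), if_neg (by omega), if_neg (by omega)]
    simp [h0, h60, h62]

-- ===== VERDICT (by name: the statement is the Claim_ definition above) =====
theorem slot_meta_spec : Claim_equal_slot_meta := by
  intro slot _
  unfold Spec_slot_meta
  exact slot_meta_eq_alt slot
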